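-- pv_equiv track=rewrite | github.com/GerryDH2807/Portfolio | Compresión de datos/A01736455_ActInt2/evidencia2.py | getBuckets
-- ===== SOURCE A (Python) =====
-- def getBuckets(T):
--   count = {}
--   buckets = {}
--   for c in T:
--     count[c] = count.get(c, 0) + 1
--   start = 0
--   for c in sorted(count.keys()):
--     buckets[c] = (start, start + count[c])
--     start += count[c]
--   return buckets
-- ===== SOURCE B (Python) =====
-- def getBuckets(T):
--     S = sorted(T)
--     buckets = {}
--     n = len(S)
--     i = 0
--     while i < n:
--         j = i
--         while j < n and S[j] == S[i]:
--             j += 1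
--         buckets[S[i]] = (i, j)
--         i = j
--     return buckets
-- ===== Notes on version B (the rewrite author's own statement) =====
-- stated objective: alternative
-- what changed: B sorts the whole string once and scans runs of equal characters with a running offset, never building a count dictionary or a separate key sort.
import Mathlib
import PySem

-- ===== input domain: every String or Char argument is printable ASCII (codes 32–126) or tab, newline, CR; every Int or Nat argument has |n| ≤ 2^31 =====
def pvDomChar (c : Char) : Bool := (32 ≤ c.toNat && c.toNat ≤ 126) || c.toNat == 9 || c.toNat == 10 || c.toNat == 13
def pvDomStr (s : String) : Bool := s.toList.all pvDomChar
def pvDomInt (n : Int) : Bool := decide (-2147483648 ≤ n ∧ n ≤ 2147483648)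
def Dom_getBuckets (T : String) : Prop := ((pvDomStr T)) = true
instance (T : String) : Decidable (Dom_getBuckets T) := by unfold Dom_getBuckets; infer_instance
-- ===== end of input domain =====

-- B sorts the string once and scans runs of equal characters with a running offset instead of building a count dictionary; alternative decomposition, not claimed faster.


-- ===== PORT A =====
def getBuckets (T : String) : List (String × Int × Int) :=
  -- count[c] = count.get(c, 0) + 1 over the characters of T
  let count : PySem.Dict Char Int :=
    T.toList.foldl (fun d c => d.insert c (d.getD c 0 + 1)) PySem.Dict.empty
  -- for c in sorted(count.keys()): buckets[c] = (start, start + count[c]); start += count[c]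
  let res :=
    (PySem.List.sorted count.keys (fun c => c) false).foldl
      (fun (st : PySem.Dict String (Int × Int) × Int) c =>
        (st.1.insert (String.ofList [c]) (st.2, st.2 + count.getD c 0), st.2 + count.getD c 0))
      (PySem.Dict.empty, 0)
  res.1.items

-- ===== PORT B =====
-- inner while loop of Source B: advance j past the run of characters equal to c,
-- returning the run length in the tail and the remainder of the list
def pvRunSplit (c : Char) : List Char → Nat × List Char
  | [] => (0, [])
  | d :: rest => if d = c then ((pvRunSplit c rest).1 + 1, (pvRunSplit c rest).2) else (0, d :: rest)

theorem pvRunSplit_len (c : Char) (l : List Char) : (pvRunSplit c l).2.length ≤ l.length := by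
  induction l with
  | nil => simp [pvRunSplit]
  | cons d rest ih =>
    by_cases h : d = c
    · simp [pvRunSplit, h]; omega
    · simp [pvRunSplit, h]

-- outer while loop of Source B: one bucket per run, offset i advances by the run length
def pvBuild : List Char → Int → List (String × Int × Int)
  | [], _ => []
  | c :: rest, i =>
    let p := pvRunSplit c rest
    (String.ofList [c], i, i + 1 + (p.1 : Int)) :: pvBuild p.2 (i + 1 + (p.1 : Int))
termination_by l => l.length
decreasing_by simpa using Nat.lt_succ_of_le (pvRunSplit_len c rest)

def getBuckets_alt (T : String) : List (String × Int × Int) :=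
  pvBuild (PySem.List.sorted T.toList (fun c => c) false) 0

-- ===== PRECONDITION & SPEC =====
def Spec_getBuckets (T : String) (out : List (String × Int × Int)) : Prop := out = getBuckets_alt T
instance (T : String) (out : List (String × Int × Int)) : Decidable (Spec_getBuckets T out) := by unfold Spec_getBuckets; infer_instance

-- ===== CLAIM (what is proved, stated in full; the proofs are below) =====
def Claim_equal_getBuckets : Prop := ∀ (T : String), Dom_getBuckets T → Spec_getBuckets T (getBuckets T)

-- ===== LEMMAS AND PROOFS =====

-- canonical result: one entry per key, cumulative offsets
def pvSpecList (K : List Char) (cnt : Char → Int) (i : Int) : List (String × Int × Int) :=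
  match K with
  | [] => []
  | c :: K' => (String.ofList [c], i, i + cnt c) :: pvSpecList K' cnt (i + cnt c)

theorem pvSpecList_congr (K : List Char) (cnt cnt' : Char → Int) (i : Int)
    (h : ∀ c ∈ K, cnt c = cnt' c) : pvSpecList K cnt i = pvSpecList K cnt' i := by
  induction K generalizing i with
  | nil => rfl
  | cons c K' ih =>
    simp only [pvSpecList, h c (by simp)]
    congr 1
    exact ih _ (fun c hc => h c (by simp [hc]))

theorem pvRunSplit_append (c : Char) (l : List Char) :
    l = List.replicate (pvRunSplit c l).1 c ++ (pvRunSplit c l).2 := by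
  induction l with
  | nil => simp [pvRunSplit]
  | cons d rest ih =>
    by_cases h : d = c
    · simp [pvRunSplit, h, List.replicate_succ]
      exact ih
    · simp [pvRunSplit, h]

theorem pvRunSplit_head (c : Char) (l : List Char) (d : Char) (t : List Char)
    (h : (pvRunSplit c l).2 = d :: t) : d ≠ c := by
  induction l with
  | nil => simp [pvRunSplit] at h
  | cons e rest ih =>
    by_cases he : e = c
    · simp [pvRunSplit, he] at h; exact ih h
    · simp [pvRunSplit, he] at h; rw [← h.1]; exact he

-- A's bucket-building loop over fresh, distinct keys appends the canonical entries
theorem pvFold_items (K : List Char) (cnt : Char → Int)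
    (d : PySem.Dict String (Int × Int)) (s : Int)
    (hfresh : ∀ c ∈ K, d.contains (String.ofList [c]) = false) (hnd : K.Nodup) :
    (K.foldl (fun st c => (st.1.insert (String.ofList [c]) (st.2, st.2 + cnt c), st.2 + cnt c))
        (d, s)).1.items = d.items ++ pvSpecList K cnt s := by
  induction K generalizing d s with
  | nil => simp [pvSpecList]
  | cons c K' ih =>
    simp only [List.foldl_cons, pvSpecList]
    rw [ih _ _ ?_ (List.Nodup.of_cons hnd)]
    · rw [PySem.Dict.items_insert_of_not_contains (h := hfresh c (by simp))]
      simp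
    · intro c' hc'
      rw [PySem.Dict.contains_insert]
      have h1 : (String.ofList [c'] == String.ofList [c]) = false := by
        have : c' ≠ c := by
          rintro rfl; exact (List.nodup_cons.mp hnd).1 hc'
        simp only [beq_eq_false_iff_ne, ne_eq]
        intro h
        exact this (by simpa using String.ofList_inj.mp h)
      rw [h1, hfresh c' (by simp [hc'])]
      rfl

-- B's run scan on a sorted list produces the canonical entries for the sorted distinct chars
theorem pvBuild_eq (n : ℕ) : ∀ (S : List Char), S.length ≤ n → S.Pairwise (· ≤ ·) → ∀ i : Int,
    pvBuild S i =
      pvSpecList (PySem.List.sorted (PySem.Set.ofList S) (fun c => c) false)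
        (fun c => (S.count c : Int)) i := by
  induction n with
  | zero =>
    intro S hS _ i
    have : S = [] := List.eq_nil_of_length_eq_zero (by omega)
    subst this
    simp [pvBuild, pvSpecList, PySem.Set.ofList, PySem.List.sorted]
  | succ n ih =>
    intro S hS hsort i
    match S with
    | [] => simp [pvBuild, PySem.Set.ofList, PySem.List.sorted, pvSpecList]
    | c :: rest =>
      obtain ⟨k, r, hkr⟩ : ∃ k r, pvRunSplit c rest = (k, r) := ⟨_, _, rfl⟩
      have hrest : rest = List.replicate k c ++ r := by
        have h := pvRunSplit_append c rest; rw [hkr] at h; exact h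
      have hsub : r.Sublist rest := by
        rw [hrest]; exact List.sublist_append_right _ _
      obtain ⟨hle, hprest⟩ := List.pairwise_cons.mp hsort
      have hsr : r.Pairwise (· ≤ ·) := hprest.sublist hsub
      have hcr : ∀ x ∈ r, c < x := by
        intro x hx
        cases r with
        | nil => simp at hx
        | cons d t =>
          have hd : d ≠ c := pvRunSplit_head c rest d t (by rw [hkr])
          have hcd : c < d := lt_of_le_of_ne (hle d (hsub.mem (by simp))) (Ne.symm hd)
          rcases List.mem_cons.mp hx with rfl | hx'
          · exact hcd
          · exact lt_of_lt_of_le hcd ((List.pairwise_cons.mp hsr).1 x hx')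
      have hcnotr : c ∉ r := fun hc => lt_irrefl c (hcr c hc)
      have hcount_c : (c :: rest).count c = k + 1 := by
        rw [hrest]
        simp [List.count_append, List.count_eq_zero.mpr hcnotr]
      have hcount_ne : ∀ c', c' ≠ c → (c :: rest).count c' = r.count c' := by
        intro c' hc'
        rw [hrest]
        simp [List.count_append, List.count_replicate, Ne.symm hc']
      have hmem_r : ∀ x, x ∈ (c :: rest) ↔ x = c ∨ x ∈ r := by
        intro x
        rw [hrest]
        simp [List.mem_replicate]
        tauto
      have hnds : (c :: PySem.List.sorted (PySem.Set.ofList r) (fun c => c) false).Nodup := by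
        rw [List.nodup_cons]
        constructor
        · intro hc
          exact hcnotr (by
            simpa [PySem.List.mem_sorted, PySem.Set.mem_ofList] using hc)
        · exact (PySem.List.sorted_perm _ _ _).symm.nodup (PySem.Set.nodup_ofList _)
      have hsortedset : PySem.List.sorted (PySem.Set.ofList (c :: rest)) (fun c => c) false
          = c :: PySem.List.sorted (PySem.Set.ofList r) (fun c => c) false := by
        apply PySem.List.sorted_eq_of_perm_of_pairwise_lt
        · rw [List.perm_ext_iff_of_nodup hnds (PySem.Set.nodup_ofList _)]
          intro a
          simp only [List.mem_cons, PySem.List.mem_sorted, PySem.Set.mem_ofList, hmem_r a]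
        · rw [List.pairwise_cons]
          refine ⟨fun x hx => ?_, PySem.List.sorted_ofList_pairwise_lt _⟩
          exact hcr x (by simpa [PySem.List.mem_sorted, PySem.Set.mem_ofList] using hx)
      have hlen : r.length ≤ n := by
        have h := congrArg List.length hrest
        simp at h
        simp at hS
        omega
      have hoff : i + ((c :: rest).count c : Int) = i + 1 + (k : Int) := by
        rw [hcount_c]; push_cast; ring
      rw [hsortedset]
      simp only [pvBuild, hkr, pvSpecList, hoff]
      congr 1
      rw [ih r hlen hsr (i + 1 + (k : Int))]
      apply pvSpecList_congr
      intro c' hc'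
      have hc'r : c' ∈ r := by
        simpa [PySem.List.mem_sorted, PySem.Set.mem_ofList] using hc'
      have hne : c' ≠ c := fun h => hcnotr (h ▸ hc'r)
      rw [hcount_ne c' hne]

-- ===== VERDICT (by name: the statement is the Claim_ definition above) =====
theorem getBuckets_spec : Claim_equal_getBuckets := by
  intro T _
  simp only [Spec_getBuckets, getBuckets, getBuckets_alt]
  rw [PySem.Dict.foldl_insert_getD_add_one_eq_counter, PySem.Dict.keys_counter]
  rw [pvFold_items _ _ _ _ ?fresh ?nodup]
  case fresh => intro c _; exact PySem.Dict.contains_empty _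
  case nodup => exact (PySem.List.sorted_perm _ _ _).symm.nodup (PySem.Set.nodup_ofList _)
  have hpair : (PySem.List.sorted T.toList (fun c => c) false).Pairwise (· ≤ ·) := by
    simpa using PySem.List.sorted_pairwise T.toList (fun c => c)
  rw [pvBuild_eq (PySem.List.sorted T.toList (fun c => c) false).length _ le_rfl hpair 0]
  have hperm : (PySem.Set.ofList (PySem.List.sorted T.toList (fun c => c) false)).Perm
      (PySem.Set.ofList T.toList) := by
    rw [List.perm_ext_iff_of_nodup (PySem.Set.nodup_ofList _) (PySem.Set.nodup_ofList _)]
    intro a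
    simp only [PySem.Set.mem_ofList, (PySem.List.sorted_perm T.toList (fun c => c) false).mem_iff]
  have hK : PySem.List.sorted (PySem.Set.ofList (PySem.List.sorted T.toList (fun c => c) false))
      (fun c => c) false = PySem.List.sorted (PySem.Set.ofList T.toList) (fun c => c) false :=
    PySem.List.sorted_eq_sorted_of_perm _ _ _ (fun a b h => h) hperm
  rw [hK]
  rw [show (PySem.Dict.empty : PySem.Dict String (Int × Int)).items = [] from rfl, List.nil_append]
  apply pvSpecList_congr
  intro c _
  rw [PySem.Dict.getD_counter]
  rw [(PySem.List.sorted_perm T.toList (fun c => c) false).count_eq]
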